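-- pv_equiv track=rewrite | github.com/3000sagar/quite-thinker | quiet_patterns/core/report_dashboard.py | _collapse_runs
-- ===== SOURCE A (Python) =====
-- from typing import Any
--
-- def _collapse_runs(rows: list[dict[str, Any]]) -> list[dict[str, Any]]:
--     """
--     Keep one dashboard row per started_at:
--     include only final `completed` reports.
--     """
--     grouped: dict[str, list[dict[str, Any]]] = {}
--     for row in rows:
--         key = str(row.get("started_at") or "")
--         grouped.setdefault(key, []).append(row)
--
--     collapsed: list[dict[str, Any]] = []
--     for key in sorted(grouped.keys()):
--         bucket = grouped[key]
--         completed = [r for r in bucket if r.get("status") == "completed"]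
--         if completed:
--             # If multiple final rows somehow exist, keep the latest by filename.
--             best = sorted(completed, key=lambda r: str(r.get("file") or ""))[-1]
--             collapsed.append(best)
--     return collapsed
-- ===== SOURCE B (Python) =====
-- from typing import Any
--
-- def _collapse_runs(rows: list[dict[str, Any]]) -> list[dict[str, Any]]:
--     """Single pass keeping the running best completed row per started_at key."""
--     best: dict[str, dict[str, Any]] = {}
--     for row in rows:
--         if row.get("status") != "completed":
--             continue
--         key = str(row.get("started_at") or "")
--         f = str(row.get("file") or "")
--         cur = best.get(key)
--         if cur is None or f >= str(cur.get("file") or ""):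
--             best[key] = row
--     return [best[k] for k in sorted(best)]
-- ===== Notes on version B (the rewrite author's own statement) =====
-- stated objective: simpler
-- what changed: B replaces A's group-all-rows-into-buckets then re-sort-each-bucket-by-filename pipeline with a single pass that keeps one running best completed row per started_at key (later rows win ties via >=), then emits the winners in sorted key order.
import Mathlib
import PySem

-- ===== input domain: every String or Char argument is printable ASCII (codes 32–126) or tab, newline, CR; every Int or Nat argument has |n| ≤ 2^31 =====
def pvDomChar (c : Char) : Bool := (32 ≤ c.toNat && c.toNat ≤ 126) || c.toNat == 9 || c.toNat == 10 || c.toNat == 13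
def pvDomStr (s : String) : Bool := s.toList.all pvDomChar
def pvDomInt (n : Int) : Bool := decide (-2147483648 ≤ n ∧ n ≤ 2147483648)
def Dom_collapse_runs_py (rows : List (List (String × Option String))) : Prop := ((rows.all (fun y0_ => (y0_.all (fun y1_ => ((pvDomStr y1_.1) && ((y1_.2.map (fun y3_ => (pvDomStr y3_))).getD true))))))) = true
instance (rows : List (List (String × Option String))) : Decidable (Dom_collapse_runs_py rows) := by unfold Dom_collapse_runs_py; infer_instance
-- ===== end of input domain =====

-- B replaces A's group-everything / re-sort-each-bucket pipeline by a single pass that keeps one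
-- running best completed row per key (objective: simpler decomposition, same result).

-- shared helpers: row.get(k) on an assoc-list row (first match), and the derived fields
def pvGet (row : List (String × Option String)) (k : String) : Option String :=
  (row.find? (fun p => p.1 == k)).bind (fun p => p.2)

-- str(row.get("started_at") or ""): None and "" both become "" — exactly Option.getD ""
def pvKeyOf (row : List (String × Option String)) : String := (pvGet row "started_at").getD ""
def pvFileOf (row : List (String × Option String)) : String := (pvGet row "file").getD ""
def pvCompleted (row : List (String × Option String)) : Bool := pvGet row "status" == some "completed"

-- ===== PORT A =====
-- grouped.setdefault(key, []).append(row) is exactly Dict.modify key [] (· ++ [row]);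
-- sorted(completed, key=…)[-1] is getLastD [] (the list is non-empty on that branch).
def collapse_runs_py (rows : List (List (String × Option String))) : List (List (String × Option String)) :=
  let grouped : PySem.Dict String (List (List (String × Option String))) :=
    rows.foldl (fun d row => d.modify (pvKeyOf row) [] (fun b => b ++ [row])) PySem.Dict.empty
  (PySem.List.sorted grouped.keys (fun k => k)).foldl
    (fun collapsed key =>
      let completed := (grouped.getD key []).filter pvCompleted
      if completed.isEmpty then collapsed
      else collapsed ++ [(PySem.List.sorted completed pvFileOf).getLastD []])
    []

-- ===== PORT B =====
-- one step of B's loop: skip non-completed rows, else keep the better (≥ by file, later wins) row per key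
def pvBStep (d : PySem.Dict String (List (String × Option String)))
    (row : List (String × Option String)) : PySem.Dict String (List (String × Option String)) :=
  if pvCompleted row then
    match d.get? (pvKeyOf row) with
    | none => d.insert (pvKeyOf row) row
    | some cur => if pvFileOf cur ≤ pvFileOf row then d.insert (pvKeyOf row) row else d
  else d

def collapse_runs_py_alt (rows : List (List (String × Option String))) : List (List (String × Option String)) :=
  let best := rows.foldl pvBStep PySem.Dict.empty
  (PySem.List.sorted best.keys (fun k => k)).map (fun k => best.getD k [])

-- ===== PRECONDITION & SPEC =====
def Spec_collapse_runs_py (rows : List (List (String × Option String))) (out : List (List (String × Option String))) : Prop := out = collapse_runs_py_alt rows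
instance (rows : List (List (String × Option String))) (out : List (List (String × Option String))) : Decidable (Spec_collapse_runs_py rows out) := by unfold Spec_collapse_runs_py; infer_instance

-- ===== CLAIM (what is proved, stated in full; the proofs are below) =====
def Claim_equal_collapse_runs_py : Prop := ∀ (rows : List (List (String × Option String))), Dom_collapse_runs_py rows → Spec_collapse_runs_py rows (collapse_runs_py rows)

-- ===== LEMMAS AND PROOFS =====

-- proof-side abstraction of B's per-key update
def pvStep (acc : Option (List (String × Option String))) (r : List (String × Option String)) :
    Option (List (String × Option String)) :=
  match acc with
  | none => some r
  | some c => if pvFileOf c ≤ pvFileOf r then some r else some c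

theorem pvStep_some_ex (a h : List (String × Option String)) :
    ∃ c, pvStep (some a) h = some c := by
  simp only [pvStep]; split <;> exact ⟨_, rfl⟩

theorem pvStep_foldl_isSome (l : List (List (String × Option String)))
    (a : List (String × Option String)) : ∃ b, l.foldl pvStep (some a) = some b := by
  induction l generalizing a with
  | nil => exact ⟨a, rfl⟩
  | cons h t ih =>
    rw [List.foldl_cons]
    obtain ⟨c, hc⟩ := pvStep_some_ex a h
    rw [hc]; exact ih c

theorem pvStep_foldl_eq_none_iff (l : List (List (String × Option String)))
    (o : Option (List (String × Option String))) :
    l.foldl pvStep o = none ↔ o = none ∧ l = [] := by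
  cases o with
  | some a =>
    obtain ⟨b, hb⟩ := pvStep_foldl_isSome l a
    simp [hb]
  | none =>
    cases l with
    | nil => simp
    | cons h t =>
      rw [List.foldl_cons]
      have e : pvStep none h = some h := rfl
      rw [e]
      obtain ⟨b, hb⟩ := pvStep_foldl_isSome t h
      simp [hb]

theorem pvInsertBy_getLastD (x : List (String × Option String))
    (s : List (List (String × Option String))) :
    ∀ (d : List (String × Option String)), s ≠ [] →
    List.Pairwise (fun a b => pvFileOf a ≤ pvFileOf b) s →
    (PySem.List.insertBy (fun a b => decide (pvFileOf a < pvFileOf b)) x s).getLastD d =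
      if pvFileOf x < pvFileOf (s.getLastD d) then s.getLastD d else x := by
  induction s with
  | nil => intro d hs _; exact absurd rfl hs
  | cons y ys ih =>
    intro d _ hp
    rw [show PySem.List.insertBy (fun a b => decide (pvFileOf a < pvFileOf b)) x (y :: ys)
        = if decide (pvFileOf x < pvFileOf y) then x :: y :: ys
          else y :: PySem.List.insertBy (fun a b => decide (pvFileOf a < pvFileOf b)) x ys
        from by simp [PySem.List.insertBy]]
    by_cases hxy : pvFileOf x < pvFileOf y
    · rw [if_pos (by simpa using hxy)]
      have hle : pvFileOf y ≤ pvFileOf (ys.getLastD y) := by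
        cases ys with
        | nil => simp
        | cons z zs => exact (List.pairwise_cons.mp hp).1 _ (List.mem_of_getLast? rfl)
      rw [List.getLastD_cons, List.getLastD_cons, List.getLastD_cons]
      rw [if_pos (lt_of_lt_of_le hxy hle)]
    · rw [if_neg (by simpa using hxy)]
      cases ys with
      | nil => simp [PySem.List.insertBy, hxy]
      | cons z zs =>
        rw [List.getLastD_cons, List.getLastD_cons]
        rw [ih y (by simp) (List.pairwise_cons.mp hp).2]

theorem pvSorted_getLastD (l : List (List (String × Option String)))
    (d : List (String × Option String)) :
    (PySem.List.sorted l pvFileOf).getLastD d = (l.foldl pvStep none).getD d := by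
  induction l using List.reverseRecOn with
  | nil => rw [PySem.List.sorted_eq_foldl_insertBy]; simp
  | append_singleton l x ih =>
    rw [PySem.List.sorted_eq_foldl_insertBy, List.foldl_append, List.foldl_cons, List.foldl_nil,
        ← PySem.List.sorted_eq_foldl_insertBy, List.foldl_append, List.foldl_cons, List.foldl_nil]
    by_cases hl : l = []
    · subst hl
      rw [PySem.List.sorted_eq_foldl_insertBy]
      simp [PySem.List.insertBy, pvStep]
    · have hsne : PySem.List.sorted l pvFileOf ≠ [] := by
        simpa [PySem.List.sorted_eq_nil_iff] using hl
      rw [pvInsertBy_getLastD x _ d hsne (PySem.List.sorted_pairwise l pvFileOf), ih]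
      cases hb : l.foldl pvStep none with
      | none => exact absurd ((pvStep_foldl_eq_none_iff l none).mp hb).2 hl
      | some b =>
        have e : pvStep (some b) x = if pvFileOf b ≤ pvFileOf x then some x else some b := by
          simp [pvStep]
        rw [e]
        by_cases hbx : pvFileOf b ≤ pvFileOf x
        · rw [if_pos hbx, if_neg (by simp [not_lt.mpr hbx]), Option.getD_some]
        · rw [if_neg hbx, if_pos (by simpa using not_le.mp hbx), Option.getD_some]

theorem pvB_get (rows : List (List (String × Option String)))
    (d : PySem.Dict String (List (String × Option String))) (k : String) :
    (rows.foldl pvBStep d).get? k =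
      ((rows.filter pvCompleted).filter (fun r => pvKeyOf r == k)).foldl pvStep (d.get? k) := by
  induction rows generalizing d with
  | nil => rfl
  | cons r rows ih =>
    rw [List.foldl_cons, ih]
    by_cases hc : pvCompleted r
    · by_cases hk : pvKeyOf r = k
      · have e1 : (pvBStep d r).get? k = pvStep (d.get? k) r := by
          subst hk
          cases hg : d.get? (pvKeyOf r) with
          | none => simp [pvBStep, hc, hg, pvStep, PySem.Dict.get?_insert_self]
          | some cur =>
            by_cases hf : pvFileOf cur ≤ pvFileOf r <;>
              simp [pvBStep, hc, hg, pvStep, hf, PySem.Dict.get?_insert_self]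
        rw [e1]
        simp [hc, hk]
      · have e1 : (pvBStep d r).get? k = d.get? k := by
          have hne : k ≠ pvKeyOf r := fun h => hk h.symm
          cases hg : d.get? (pvKeyOf r) with
          | none => simp [pvBStep, hc, hg, PySem.Dict.get?_insert_of_ne d r hne]
          | some cur =>
            by_cases hf : pvFileOf cur ≤ pvFileOf r <;>
              simp [pvBStep, hc, hg, hf, PySem.Dict.get?_insert_of_ne d r hne]
        rw [e1]
        simp [hc, hk]
    · have e1 : pvBStep d r = d := by simp [pvBStep, hc]
      rw [e1]
      simp [hc]

theorem pvB_nodup (rows : List (List (String × Option String)))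
    (d : PySem.Dict String (List (String × Option String))) (h : d.keys.Nodup) :
    (rows.foldl pvBStep d).keys.Nodup := by
  induction rows generalizing d with
  | nil => exact h
  | cons r rows ih =>
    rw [List.foldl_cons]
    apply ih
    simp only [pvBStep]
    split
    · split
      · exact PySem.Dict.nodup_keys_insert _ _ _ h
      · split
        · exact PySem.Dict.nodup_keys_insert _ _ _ h
        · exact h
    · exact h

theorem pvGrouped_getD (rows : List (List (String × Option String))) (k : String) :
    (rows.foldl (fun d row => d.modify (pvKeyOf row) [] (fun b => b ++ [row]))
        (PySem.Dict.empty : PySem.Dict String (List (List (String × Option String))))).getD k [] =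
      rows.filter (fun r => pvKeyOf r == k) := by
  have e : rows.foldl (fun d row => d.modify (pvKeyOf row) [] (fun b => b ++ [row]))
      (PySem.Dict.empty : PySem.Dict String (List (List (String × Option String))))
      = (rows.map (fun r => (pvKeyOf r, r))).foldl
          (fun d p => d.modify p.1 [] (fun b => b ++ [p.2])) PySem.Dict.empty := by
    rw [List.foldl_map]
  rw [e, PySem.Dict.getD_foldl_modify_append]
  rw [List.filter_map]
  simp [List.map_map, Function.comp_def, PySem.Dict.getD_empty]

-- the common per-key group: completed rows of `rows` whose key is k, in order
def pvCG (rows : List (List (String × Option String))) (k : String) :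
    List (List (String × Option String)) :=
  (rows.filter pvCompleted).filter (fun r => pvKeyOf r == k)

theorem pvBucket_eq (rows : List (List (String × Option String))) (k : String) :
    ((rows.foldl (fun d row => d.modify (pvKeyOf row) [] (fun b => b ++ [row]))
        (PySem.Dict.empty : PySem.Dict String (List (List (String × Option String))))).getD k
        []).filter pvCompleted = pvCG rows k := by
  rw [pvGrouped_getD, pvCG, List.filter_filter, List.filter_filter]
  apply List.filter_congr
  intro r _
  exact Bool.and_comm _ _

theorem pvBest_get (rows : List (List (String × Option String))) (k : String) :
    (rows.foldl pvBStep PySem.Dict.empty).get? k = (pvCG rows k).foldl pvStep none := by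
  rw [pvB_get, PySem.Dict.get?_empty, pvCG]

theorem pvMain (rows : List (List (String × Option String))) :
    collapse_runs_py rows = collapse_runs_py_alt rows := by
  simp only [collapse_runs_py, collapse_runs_py_alt]
  set grouped := rows.foldl (fun d row => d.modify (pvKeyOf row) [] (fun b => b ++ [row]))
      (PySem.Dict.empty : PySem.Dict String (List (List (String × Option String)))) with hg
  set best := rows.foldl pvBStep
      (PySem.Dict.empty : PySem.Dict String (List (String × Option String))) with hbst
  -- A's collecting fold is an append-if fold
  have hstep : (fun (collapsed : List (List (String × Option String))) key =>
        if ((grouped.getD key []).filter pvCompleted).isEmpty then collapsed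
        else collapsed ++ [(PySem.List.sorted ((grouped.getD key []).filter pvCompleted)
            pvFileOf).getLastD []])
      = fun collapsed key =>
        if (!((grouped.getD key []).filter pvCompleted).isEmpty) = true then
          collapsed ++ [(PySem.List.sorted ((grouped.getD key []).filter pvCompleted)
            pvFileOf).getLastD []]
        else collapsed := by
    funext c k
    cases ((grouped.getD k []).filter pvCompleted).isEmpty <;> simp
  rw [hstep, PySem.List.foldl_append_if, List.nil_append]
  -- nodup facts
  have hKAnodup : grouped.keys.Nodup := by
    rw [hg]
    exact PySem.Dict.nodup_keys_foldl_modify_key rows pvKeyOf [] (fun _ x => fun b => b ++ [x]) _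
      PySem.Dict.nodup_keys_empty
  have hKBnodup : best.keys.Nodup := pvB_nodup rows _ PySem.Dict.nodup_keys_empty
  have hSAnodup : (PySem.List.sorted grouped.keys (fun k => k)).Nodup :=
    (PySem.List.sorted_perm grouped.keys (fun k => k) false).symm.nodup hKAnodup
  -- membership of grouped.keys
  have hKAmem : ∀ k, k ∈ grouped.keys ↔ k ∈ rows.map pvKeyOf := by
    intro k
    rw [hg, PySem.Dict.keys_foldl_modify_key rows pvKeyOf [] (fun _ x => fun b => b ++ [x]) _,
        PySem.Dict.keys_empty, PySem.Set.update_nil_left]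
    exact PySem.Set.mem_ofList _ _
  -- membership of best.keys
  have hKBmem : ∀ k, k ∈ best.keys ↔ pvCG rows k ≠ [] := by
    intro k
    constructor
    · intro hk hnil
      have : best.get? k = none := by rw [pvBest_get, hnil]; rfl
      exact (PySem.Dict.get?_eq_none_iff_not_mem_keys best k).mp this hk
    · intro hne
      by_contra hk
      have : best.get? k = none := (PySem.Dict.get?_eq_none_iff_not_mem_keys best k).mpr hk
      rw [pvBest_get] at this
      exact hne ((pvStep_foldl_eq_none_iff _ _).mp this).2
  -- the filtered sorted key list of A equals the sorted key list of B
  have hkeys : (PySem.List.sorted grouped.keys (fun k => k)).filter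
        (fun k => !((grouped.getD k []).filter pvCompleted).isEmpty)
      = PySem.List.sorted best.keys (fun k => k) := by
    symm
    apply PySem.List.sorted_eq_of_perm_of_pairwise_lt
    · rw [List.perm_ext_iff_of_nodup (hSAnodup.filter _) hKBnodup]
      intro k
      rw [List.mem_filter, PySem.List.mem_sorted, hKBmem]
      constructor
      · rintro ⟨-, hp⟩
        rw [pvBucket_eq] at hp
        simpa using hp
      · intro hne
        refine ⟨?_, by rw [pvBucket_eq]; simpa using hne⟩
        obtain ⟨r, hr⟩ := List.exists_mem_of_ne_nil _ hne
        have hr1 := List.mem_filter.mp hr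
        have hr2 := List.mem_filter.mp hr1.1
        rw [hKAmem]
        exact List.mem_map.mpr ⟨r, hr2.1, by simpa using hr1.2⟩
    · have h1 : List.Pairwise (fun a b : String => a ≤ b)
          (PySem.List.sorted grouped.keys (fun k => k)) :=
        PySem.List.sorted_pairwise grouped.keys (fun k => k)
      have h2 : List.Pairwise (fun a b : String => a ≠ b)
          (PySem.List.sorted grouped.keys (fun k => k)) := hSAnodup
      exact ((h1.and h2).sublist List.filter_sublist).imp
        (fun h => lt_of_le_of_ne h.1 h.2)
  rw [hkeys]
  apply List.map_congr_left
  intro k _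
  rw [pvBucket_eq, pvSorted_getLastD, PySem.Dict.getD_eq_get?_getD, pvBest_get]

-- ===== VERDICT (by name: the statement is the Claim_ definition above) =====
theorem collapse_runs_py_spec : Claim_equal_collapse_runs_py := by
  intro rows _
  exact pvMain rows
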